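-- pv_equiv track=rewrite | github.com/SAMURIVERA9/python1 | main.py | calcular_ruta
-- ===== SOURCE A (Python) =====
-- def calcular_ruta(inicio, fin):
--     ruta = []
--     x1, y1 = inicio
--     x2, y2 = fin
--     while x1 != x2 or y1 != y2:
--         if x1 < x2:
--             x1 += 1
--         elif x1 > x2:
--             x1 -= 1
--         elif y1 < y2:
--             y1 += 1
--         elif y1 > y2:
--             y1 -= 1
--         ruta.append((x1, y1))
--     return ruta
-- ===== SOURCE B (Python) =====
-- def calcular_ruta(inicio, fin):
--     x1, y1 = inicio
--     x2, y2 = fin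
--     sx = 1 if x2 > x1 else -1
--     xs = [(x, y1) for x in range(x1 + sx, x2 + sx, sx)] if x1 != x2 else []
--     sy = 1 if y2 > y1 else -1
--     ys = [(x2, y) for y in range(y1 + sy, y2 + sy, sy)] if y1 != y2 else []
--     return xs + ys
-- ===== Notes on version B (the rewrite author's own statement) =====
-- stated objective: simpler
-- what changed: Replaces the step-by-step simulation loop with a closed-form construction of the two straight segments (x-run then y-run) as range comprehensions.
import Mathlib
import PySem

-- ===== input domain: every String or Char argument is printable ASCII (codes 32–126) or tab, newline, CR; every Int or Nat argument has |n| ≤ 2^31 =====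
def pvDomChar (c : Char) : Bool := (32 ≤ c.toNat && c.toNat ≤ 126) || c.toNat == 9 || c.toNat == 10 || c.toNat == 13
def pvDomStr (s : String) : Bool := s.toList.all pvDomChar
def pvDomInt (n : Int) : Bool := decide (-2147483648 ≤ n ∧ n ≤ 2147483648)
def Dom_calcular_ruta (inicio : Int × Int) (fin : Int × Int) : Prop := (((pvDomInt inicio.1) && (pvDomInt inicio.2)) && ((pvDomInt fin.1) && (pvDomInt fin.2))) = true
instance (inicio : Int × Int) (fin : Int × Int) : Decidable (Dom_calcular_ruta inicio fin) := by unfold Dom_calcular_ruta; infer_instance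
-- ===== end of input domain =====

-- B replaces A's step-by-step walking loop with a closed-form build of the two straight
-- segments (x-run then y-run) via range comprehensions; same result, simpler structure.


-- ===== PORT A =====
-- the while loop of A, step for step: branch order preserved, one step appended per iteration
def calcularRutaLoop (x1 y1 x2 y2 : Int) : List (Int × Int) :=
  if _h : x1 ≠ x2 ∨ y1 ≠ y2 then
    if x1 < x2 then (x1 + 1, y1) :: calcularRutaLoop (x1 + 1) y1 x2 y2
    else if x1 > x2 then (x1 - 1, y1) :: calcularRutaLoop (x1 - 1) y1 x2 y2
    else if y1 < y2 then (x1, y1 + 1) :: calcularRutaLoop x1 (y1 + 1) x2 y2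
    else if y1 > y2 then (x1, y1 - 1) :: calcularRutaLoop x1 (y1 - 1) x2 y2
    else []
  else []
termination_by (x2 - x1).natAbs + (y2 - y1).natAbs
decreasing_by all_goals omega

def calcular_ruta (inicio : Int × Int) (fin : Int × Int) : List (Int × Int) :=
  calcularRutaLoop inicio.1 inicio.2 fin.1 fin.2

-- ===== PORT B =====
def calcular_ruta_alt (inicio : Int × Int) (fin : Int × Int) : List (Int × Int) :=
  let x1 := inicio.1; let y1 := inicio.2
  let x2 := fin.1; let y2 := fin.2
  let sx : Int := if x2 > x1 then 1 else -1
  let xs := if x1 ≠ x2 then (PySem.List.pyRange (x1 + sx) (x2 + sx) sx).map (fun x => (x, y1)) else []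
  let sy : Int := if y2 > y1 then 1 else -1
  let ys := if y1 ≠ y2 then (PySem.List.pyRange (y1 + sy) (y2 + sy) sy).map (fun y => (x2, y)) else []
  xs ++ ys

-- ===== PRECONDITION & SPEC =====
def Spec_calcular_ruta (inicio : Int × Int) (fin : Int × Int) (out : List (Int × Int)) : Prop := out = calcular_ruta_alt inicio fin
instance (inicio : Int × Int) (fin : Int × Int) (out : List (Int × Int)) : Decidable (Spec_calcular_ruta inicio fin out) := by unfold Spec_calcular_ruta; infer_instance

-- ===== CLAIM (what is proved, stated in full; the proofs are below) =====
def Claim_equal_calcular_ruta : Prop := ∀ (inicio : Int × Int) (fin : Int × Int), Dom_calcular_ruta inicio fin → Spec_calcular_ruta inicio fin (calcular_ruta inicio fin)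

-- ===== LEMMAS AND PROOFS =====

-- vertical run, going up
theorem loop_y_up (x y1 y2 : Int) (h : y1 ≤ y2) :
    calcularRutaLoop x y1 x y2 = (PySem.List.pyRange (y1 + 1) (y2 + 1) 1).map (fun y => (x, y)) := by
  by_cases hlt : y1 < y2
  · rw [calcularRutaLoop, dif_pos (Or.inr (by omega : y1 ≠ y2)),
        if_neg (lt_irrefl x), if_neg (lt_irrefl x), if_pos hlt,
        loop_y_up x (y1 + 1) y2 (by omega),
        PySem.List.pyRange_one_cons (by omega : y1 + 1 < y2 + 1)]
    simp
  · have : y1 = y2 := by omega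
    subst this
    rw [calcularRutaLoop]
    simp [PySem.List.pyRange_one_eq_nil (le_refl (y1 + 1))]
termination_by (y2 - y1).natAbs
decreasing_by omega

-- vertical run, going down (range endpoints written y+ -1 to match B's `y + sy` with sy = -1)
theorem loop_y_down (x y1 y2 : Int) (h : y2 ≤ y1) :
    calcularRutaLoop x y1 x y2 = (PySem.List.pyRange (y1 + -1) (y2 + -1) (-1)).map (fun y => (x, y)) := by
  by_cases hgt : y2 < y1
  · rw [calcularRutaLoop, dif_pos (Or.inr (by omega : y1 ≠ y2)),
        if_neg (lt_irrefl x), if_neg (lt_irrefl x), if_neg (by omega : ¬ y1 < y2), if_pos hgt,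
        loop_y_down x (y1 - 1) y2 (by omega),
        PySem.List.pyRange_neg_one_cons (by omega : y2 + -1 < y1 + -1)]
    simp
    exact ⟨by ring, by ring_nf⟩
  · have : y1 = y2 := by omega
    subst this
    rw [calcularRutaLoop]
    simp [PySem.List.pyRange_neg_one_eq_nil (le_refl (y1 + -1))]
termination_by (y1 - y2).natAbs
decreasing_by omega

-- horizontal run peels off first; ends at (x2, y1), then continues with the vertical run
theorem loop_x_up (x1 y1 x2 y2 : Int) (h : x1 ≤ x2) :
    calcularRutaLoop x1 y1 x2 y2 =
      (PySem.List.pyRange (x1 + 1) (x2 + 1) 1).map (fun x => (x, y1)) ++ calcularRutaLoop x2 y1 x2 y2 := by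
  by_cases hlt : x1 < x2
  · rw [calcularRutaLoop, dif_pos (Or.inl (by omega : x1 ≠ x2)), if_pos hlt,
        loop_x_up (x1 + 1) y1 x2 y2 (by omega),
        PySem.List.pyRange_one_cons (by omega : x1 + 1 < x2 + 1)]
    simp
  · have : x1 = x2 := by omega
    subst this
    simp [PySem.List.pyRange_one_eq_nil (le_refl (x1 + 1))]
termination_by (x2 - x1).natAbs
decreasing_by omega

theorem loop_x_down (x1 y1 x2 y2 : Int) (h : x2 ≤ x1) :
    calcularRutaLoop x1 y1 x2 y2 =
      (PySem.List.pyRange (x1 + -1) (x2 + -1) (-1)).map (fun x => (x, y1)) ++ calcularRutaLoop x2 y1 x2 y2 := by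
  by_cases hgt : x2 < x1
  · rw [calcularRutaLoop, dif_pos (Or.inl (by omega : x1 ≠ x2)),
        if_neg (by omega : ¬ x1 < x2), if_pos hgt,
        loop_x_down (x1 - 1) y1 x2 y2 (by omega),
        PySem.List.pyRange_neg_one_cons (by omega : x2 + -1 < x1 + -1)]
    simp
    exact ⟨by ring, by ring_nf⟩
  · have : x1 = x2 := by omega
    subst this
    simp [PySem.List.pyRange_neg_one_eq_nil (le_refl (x1 + -1))]
termination_by (x1 - x2).natAbs
decreasing_by omega

-- the loop started at x1 = x2 equals B's y-segment
theorem loop_y_seg (x y1 y2 : Int) :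
    calcularRutaLoop x y1 x y2 =
      (if y1 ≠ y2 then
        (PySem.List.pyRange (y1 + (if y2 > y1 then 1 else -1)) (y2 + (if y2 > y1 then 1 else -1))
            (if y2 > y1 then 1 else -1)).map (fun y => (x, y))
      else []) := by
  by_cases hlt : y1 < y2
  · rw [if_pos (by omega : y1 ≠ y2), if_pos (by omega : y2 > y1), loop_y_up x y1 y2 (by omega)]
  · by_cases hgt : y2 < y1
    · rw [if_pos (by omega : y1 ≠ y2), if_neg (by omega : ¬ y2 > y1), loop_y_down x y1 y2 (by omega)]
    · have : y1 = y2 := by omega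
      subst this
      rw [calcularRutaLoop]
      simp

-- ===== VERDICT (by name: the statement is the Claim_ definition above) =====
theorem calcular_ruta_spec : Claim_equal_calcular_ruta := by
  intro inicio fin _
  unfold Spec_calcular_ruta calcular_ruta calcular_ruta_alt
  obtain ⟨x1, y1⟩ := inicio
  obtain ⟨x2, y2⟩ := fin
  simp only
  by_cases hx : x1 < x2
  · rw [if_pos (by omega : x1 ≠ x2), if_pos (by omega : x2 > x1),
        loop_x_up x1 y1 x2 y2 (by omega), loop_y_seg]
  · by_cases hx2 : x2 < x1
    · rw [if_pos (by omega : x1 ≠ x2), if_neg (by omega : ¬ x2 > x1),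
        loop_x_down x1 y1 x2 y2 (by omega), loop_y_seg]
    · have : x1 = x2 := by omega
      subst this
      rw [if_neg (by omega : ¬ x1 ≠ x1), loop_y_seg]
      simp
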